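-- pv_equiv track=rewrite | github.com/sgx-labs/statelessagent | eval/longmemeval/run_bench.py | check_retrieval_recall
-- ===== SOURCE A (Python) =====
-- def check_retrieval_recall(retrieved: list[dict], answer: str,
--                            answer_session_ids: list[int],
--                            session_id_map: dict[str, int] | None = None
--                            ) -> dict:
--     """
--     Evaluate retrieval quality.
--
--     Returns dict with:
--       - answer_in_context: bool (answer string found in retrieved text)
--       - session_recall: bool (evidence session retrieved)
--     """
--     # Check if answer text appears in retrieved chunks
--     combined_text = " ".join(r.get("text", "") for r in retrieved).lower()
--     answer_in_context = answer.lower() in combined_text if answer else False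
--
--     # Check if evidence sessions were retrieved
--     session_recall = False
--     if session_id_map and answer_session_ids:
--         retrieved_paths = {r.get("path", "") for r in retrieved}
--         for sid in answer_session_ids:
--             for path, mapped_id in session_id_map.items():
--                 if mapped_id == sid and path in retrieved_paths:
--                     session_recall = True
--                     break
--
--     return {
--         "answer_in_context": answer_in_context,
--         "session_recall": session_recall,
--     }
-- ===== SOURCE B (Python) =====
-- def check_retrieval_recall(retrieved: list[dict], answer: str,
--                            answer_session_ids: list[int],
--                            session_id_map: dict[str, int] | None = None
--                            ) -> dict:
--     # one pass over retrieved gathers both text pieces and the path set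
--     texts = []
--     paths = set()
--     for r in retrieved:
--         texts.append(r.get("text", ""))
--         paths.add(r.get("path", ""))
--
--     answer_in_context = bool(answer) and answer.lower() in " ".join(texts).lower()
--
--     # single scan of the map against the set of wanted session ids
--     wanted = set(answer_session_ids)
--     session_recall = bool(session_id_map) and bool(answer_session_ids) and any(
--         mid in wanted and p in paths for p, mid in session_id_map.items())
--
--     return {
--         "answer_in_context": answer_in_context,
--         "session_recall": session_recall,
--     }
-- ===== Notes on version B (the rewrite author's own statement) =====
-- stated objective: faster
-- what changed: One pass over retrieved builds texts and the path set together, and session_recall inverts A's loop nesting: instead of rescanning session_id_map for every answer id, B builds the set of wanted ids once and makes a single scan of the map testing membership in that set and in the path set.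
import Mathlib
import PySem

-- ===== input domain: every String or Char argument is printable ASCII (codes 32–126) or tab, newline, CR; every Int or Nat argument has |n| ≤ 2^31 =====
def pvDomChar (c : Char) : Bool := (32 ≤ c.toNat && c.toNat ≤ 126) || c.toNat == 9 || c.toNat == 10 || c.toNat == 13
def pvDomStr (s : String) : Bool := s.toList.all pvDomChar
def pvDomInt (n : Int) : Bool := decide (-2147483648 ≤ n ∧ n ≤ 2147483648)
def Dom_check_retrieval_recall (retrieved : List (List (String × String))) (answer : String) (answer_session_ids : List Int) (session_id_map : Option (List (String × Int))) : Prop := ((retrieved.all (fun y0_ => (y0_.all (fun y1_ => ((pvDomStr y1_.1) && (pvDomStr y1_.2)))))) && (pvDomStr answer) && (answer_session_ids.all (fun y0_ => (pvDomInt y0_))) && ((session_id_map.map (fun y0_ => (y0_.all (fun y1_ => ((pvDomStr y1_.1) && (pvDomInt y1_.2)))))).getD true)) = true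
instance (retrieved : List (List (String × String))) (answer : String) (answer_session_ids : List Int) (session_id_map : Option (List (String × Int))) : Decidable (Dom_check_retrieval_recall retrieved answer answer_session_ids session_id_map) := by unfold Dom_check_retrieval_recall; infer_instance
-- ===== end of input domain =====

-- B makes one pass over `retrieved` building texts and the path set together, and replaces
-- A's nested scan (rescan session_id_map per answer id) with a single scan of the map
-- against the set of wanted ids; same return value, objective: alternative decomposition.

-- ===== PORT A =====
-- inner 'for path, mapped_id in session_id_map.items(): … break' loop of A
def pvAInner (m : List (String × Int)) (sid : Int) (paths : PySem.Set String) (sr : Bool) : Bool :=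
  match m with
  | [] => sr
  | (path, mid) :: rest =>
      if mid == sid && PySem.Set.contains paths path then true
      else pvAInner rest sid paths sr

def check_retrieval_recall (retrieved : List (List (String × String))) (answer : String) (answer_session_ids : List Int) (session_id_map : Option (List (String × Int))) : List (String × Bool) :=
  let combined_text := PySem.Str.lower (PySem.Str.join " " (retrieved.map (fun r => (PySem.Dict.mk r).getD "text" "")))
  let answer_in_context := if answer ≠ "" then PySem.Str.isIn (PySem.Str.lower answer) combined_text else false
  let session_recall :=
    match session_id_map with
    | none => false
    | some m =>
        if m ≠ [] ∧ answer_session_ids ≠ [] then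
          let retrieved_paths := PySem.Set.ofList (retrieved.map (fun r => (PySem.Dict.mk r).getD "path" ""))
          answer_session_ids.foldl (fun sr sid => pvAInner m sid retrieved_paths sr) false
        else false
  [("answer_in_context", answer_in_context), ("session_recall", session_recall)]

-- ===== PORT B =====
def check_retrieval_recall_alt (retrieved : List (List (String × String))) (answer : String) (answer_session_ids : List Int) (session_id_map : Option (List (String × Int))) : List (String × Bool) :=
  -- one pass: texts.append(r.get("text","")) and paths.add(r.get("path",""))
  let acc := retrieved.foldl
    (fun (st : List String × PySem.Set String) r =>
      (st.1 ++ [(PySem.Dict.mk r).getD "text" ""],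
       PySem.Set.add st.2 ((PySem.Dict.mk r).getD "path" "")))
    ([], PySem.Set.empty)
  let answer_in_context :=
    (!(answer == "")) && PySem.Str.isIn (PySem.Str.lower answer) (PySem.Str.lower (PySem.Str.join " " acc.1))
  let wanted := PySem.Set.ofList answer_session_ids
  let session_recall :=
    match session_id_map with
    | none => false
    | some m =>
        (!(m == [])) && (!(answer_session_ids == [])) &&
          m.any (fun pm => PySem.Set.contains wanted pm.2 && PySem.Set.contains acc.2 pm.1)
  [("answer_in_context", answer_in_context), ("session_recall", session_recall)]

-- ===== PRECONDITION & SPEC =====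
def Spec_check_retrieval_recall (retrieved : List (List (String × String))) (answer : String) (answer_session_ids : List Int) (session_id_map : Option (List (String × Int))) (out : List (String × Bool)) : Prop := out = check_retrieval_recall_alt retrieved answer answer_session_ids session_id_map
instance (retrieved : List (List (String × String))) (answer : String) (answer_session_ids : List Int) (session_id_map : Option (List (String × Int))) (out : List (String × Bool)) : Decidable (Spec_check_retrieval_recall retrieved answer answer_session_ids session_id_map out) := by unfold Spec_check_retrieval_recall; infer_instance

-- ===== CLAIM (what is proved, stated in full; the proofs are below) =====
def Claim_equal_check_retrieval_recall : Prop := ∀ (retrieved : List (List (String × String))) (answer : String) (answer_session_ids : List Int) (session_id_map : Option (List (String × Int))), Dom_check_retrieval_recall retrieved answer answer_session_ids session_id_map → Spec_check_retrieval_recall retrieved answer answer_session_ids session_id_map (check_retrieval_recall retrieved answer answer_session_ids session_id_map)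

-- ===== LEMMAS AND PROOFS =====

-- B's single pass over retrieved splits into the two projections A computes
theorem pvFoldPair (retrieved : List (List (String × String))) (ts : List String) (s : PySem.Set String) :
    retrieved.foldl
      (fun (st : List String × PySem.Set String) r =>
        (st.1 ++ [(PySem.Dict.mk r).getD "text" ""],
         PySem.Set.add st.2 ((PySem.Dict.mk r).getD "path" "")))
      (ts, s)
    = (ts ++ retrieved.map (fun r => (PySem.Dict.mk r).getD "text" ""),
       (retrieved.map (fun r => (PySem.Dict.mk r).getD "path" "")).foldl PySem.Set.add s) := by
  induction retrieved generalizing ts s with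
  | nil => simp
  | cons r rest ih => simp [List.foldl_cons, ih]

-- A's inner loop returns true iff it was already true or some map entry matches
theorem pvAInner_eq (m : List (String × Int)) (sid : Int) (paths : PySem.Set String) (sr : Bool) :
    pvAInner m sid paths sr = (sr || m.any (fun pm => pm.2 == sid && PySem.Set.contains paths pm.1)) := by
  induction m with
  | nil => simp [pvAInner]
  | cons pm rest ih =>
      obtain ⟨p, mid⟩ := pm
      simp only [pvAInner, List.any_cons, ih]
      cases hmc : (mid == sid && PySem.Set.contains paths p) <;> simp

theorem pvFoldlOrAny {α : Type} (l : List α) (g : α → Bool) (b : Bool) :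
    l.foldl (fun sr x => sr || g x) b = (b || l.any g) := by
  induction l generalizing b with
  | nil => simp
  | cons x xs ih => simp [List.foldl_cons, ih, Bool.or_assoc]

-- A's nested scan equals B's single scan of the map against the wanted-id set
theorem pvScanSwap (m : List (String × Int)) (sids : List Int) (paths : PySem.Set String) :
    sids.foldl (fun sr sid => pvAInner m sid paths sr) false
      = m.any (fun pm => PySem.Set.contains (PySem.Set.ofList sids) pm.2 && PySem.Set.contains paths pm.1) := by
  simp only [pvAInner_eq]
  rw [pvFoldlOrAny]
  rw [Bool.eq_iff_iff]
  simp only [Bool.false_or, List.any_eq_true, Bool.and_eq_true, beq_iff_eq,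
    PySem.Set.contains_iff, PySem.Set.mem_ofList]
  aesop

-- ===== VERDICT (by name: the statement is the Claim_ definition above) =====
theorem check_retrieval_recall_spec : Claim_equal_check_retrieval_recall := by
  intro retrieved answer sids session_id_map _
  unfold Spec_check_retrieval_recall check_retrieval_recall check_retrieval_recall_alt
  rw [pvFoldPair]
  simp only [List.nil_append]
  refine List.cons_eq_cons.mpr ⟨?_, ?_⟩
  · by_cases h : answer = "" <;> simp [h]
  · refine congrArg (fun b => [("session_recall", b)]) ?_
    cases session_id_map with
    | none => rfl
    | some m =>
        by_cases hm : m = [] <;> by_cases hs : sids = [] <;>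
          simp [hm, hs, pvScanSwap, PySem.Set.ofList]
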